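-- pv_equiv track=rewrite | github.com/helgistein/verk-5 | All _stuff/Tíma dót/all_stuff/New_chess.py | get_points_per_birthyear
-- ===== SOURCE A (Python) =====
-- def get_points_per_birthyear(chess_players_dict):
--     my_dict = {}
--     for chess_players_dict in chess_players_dict.items():
--         birthyear = chess_players_dict[1][3]
--         if birthyear in my_dict:
--             my_dict[birthyear][0] += 1
--             my_dict[birthyear][1] += chess_players_dict[1][2]
--         else:
--             data = [1,chess_players_dict[1][2]]
--             my_dict[birthyear] = data
--     return my_dict
-- ===== SOURCE B (Python) =====
-- def get_points_per_birthyear(chess_players_dict):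
--     # group-then-aggregate: collect each year's point values, then shape [count, total]
--     groups = {}
--     for info in chess_players_dict.values():
--         groups.setdefault(info[3], []).append(info[2])
--     return {year: [len(points), sum(points)] for year, points in groups.items()}
-- ===== Notes on version B (the rewrite author's own statement) =====
-- stated objective: alternative
-- what changed: B replaces A's single loop with running count/total accumulators by a two-phase group-then-aggregate: one pass collects each birthyear's point values into a grouping dict, a second pass shapes each group into the pair of its length and its sum.
import Mathlib
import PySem

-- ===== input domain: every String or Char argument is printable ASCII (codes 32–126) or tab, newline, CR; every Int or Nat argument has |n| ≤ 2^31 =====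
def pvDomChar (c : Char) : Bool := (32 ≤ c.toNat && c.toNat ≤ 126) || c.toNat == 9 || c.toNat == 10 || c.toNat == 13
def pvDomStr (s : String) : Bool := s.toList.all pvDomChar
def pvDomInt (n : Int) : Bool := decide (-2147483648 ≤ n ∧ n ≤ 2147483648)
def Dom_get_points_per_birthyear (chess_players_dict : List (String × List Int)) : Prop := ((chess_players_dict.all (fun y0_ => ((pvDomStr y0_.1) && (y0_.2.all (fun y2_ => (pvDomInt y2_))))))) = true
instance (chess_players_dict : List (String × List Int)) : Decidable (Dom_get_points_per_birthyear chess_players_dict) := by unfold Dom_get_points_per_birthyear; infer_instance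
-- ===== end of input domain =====

-- B builds a dict of per-year point lists first, then shapes each into [count, total] in a second
-- pass (group-then-aggregate decomposition); same cost, no speed claim.


-- ===== PORT A =====
def get_points_per_birthyear (chess_players_dict : List (String × List Int)) : List (Int × List Int) :=
  (chess_players_dict.foldl (fun my_dict kv =>
      let birthyear := (PySem.List.pyGet? kv.2 3).getD 0   -- value[3]; Pre_ guarantees some
      let pts := (PySem.List.pyGet? kv.2 2).getD 0          -- value[2]; Pre_ guarantees some
      if my_dict.contains birthyear then
        -- my_dict[birthyear][0] += 1; my_dict[birthyear][1] += pts  (in-place list update)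
        my_dict.modify birthyear [] (fun data => [data.getD 0 0 + 1, data.getD 1 0 + pts])
      else
        my_dict.insert birthyear [1, pts])
    PySem.Dict.empty).items

-- ===== PORT B =====
def get_points_per_birthyear_alt (chess_players_dict : List (String × List Int)) : List (Int × List Int) :=
  let groups := chess_players_dict.foldl (fun g kv =>
      -- groups.setdefault(info[3], []).append(info[2])
      g.modify ((PySem.List.pyGet? kv.2 3).getD 0) [] (· ++ [(PySem.List.pyGet? kv.2 2).getD 0]))
    PySem.Dict.empty
  groups.items.map (fun yp => (yp.1, [(yp.2.length : Int), yp.2.sum]))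

-- ===== PRECONDITION & SPEC =====
-- Pre_ excludes exactly the inputs on which Python A raises IndexError: a value list shorter
-- than 4 makes value[3] (or value[2]) raise.
def Pre_get_points_per_birthyear (chess_players_dict : List (String × List Int)) : Prop :=
  ∀ p ∈ chess_players_dict, 4 ≤ p.2.length
instance (chess_players_dict : List (String × List Int)) : Decidable (Pre_get_points_per_birthyear chess_players_dict) := by unfold Pre_get_points_per_birthyear; infer_instance
def pvWitness_get_points_per_birthyear : (List (String × List Int)) :=
  [("a", [0, 0, 5, 1990]), ("b", [1, 1, 3, 1990]), ("c", [2, 2, 7, 1985])]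
def Spec_get_points_per_birthyear (chess_players_dict : List (String × List Int)) (out : List (Int × List Int)) : Prop := out = get_points_per_birthyear_alt chess_players_dict
instance (chess_players_dict : List (String × List Int)) (out : List (Int × List Int)) : Decidable (Spec_get_points_per_birthyear chess_players_dict out) := by unfold Spec_get_points_per_birthyear; infer_instance

-- ===== CLAIM (what is proved, stated in full; the proofs are below) =====
def Claim_equal_get_points_per_birthyear : Prop := ∀ (chess_players_dict : List (String × List Int)), Dom_get_points_per_birthyear chess_players_dict → Pre_get_points_per_birthyear chess_players_dict → Spec_get_points_per_birthyear chess_players_dict (get_points_per_birthyear chess_players_dict)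

-- ===== LEMMAS AND PROOFS =====

-- shape a per-year point list into A's running [count, total] pair
def pvShape (p : Int × List Int) : Int × List Int := (p.1, [(p.2.length : Int), p.2.sum])

def pvF (g : PySem.Dict Int (List Int)) : PySem.Dict Int (List Int) :=
  PySem.Dict.mk (g.items.map pvShape)

lemma pvF_contains (g : PySem.Dict Int (List Int)) (y : Int) :
    (pvF g).contains y = g.contains y := by
  have hfun : ((fun p : Int × List Int => p.1 == y) ∘ pvShape) = (fun p => p.1 == y) :=
    funext fun p => rfl
  simp [pvF, PySem.Dict.contains, List.any_map, hfun]

lemma pvF_get? (g : PySem.Dict Int (List Int)) (y : Int) :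
    (pvF g).get? y = (g.get? y).map (fun pts => [(pts.length : Int), pts.sum]) := by
  have hfun : ((fun p : Int × List Int => p.1 == y) ∘ pvShape) = (fun p => p.1 == y) :=
    funext fun p => rfl
  simp only [pvF, List.find?_map, hfun, PySem.Dict.get?]
  cases g.items.find? (fun p => p.1 == y) <;> simp [pvShape]

-- one loop step of A on the shaped dict equals the shape of one loop step of B
lemma pvStep (g : PySem.Dict Int (List Int)) (y pt : Int) :
    (if (pvF g).contains y then
        (pvF g).modify y [] (fun data => [data.getD 0 0 + 1, data.getD 1 0 + pt])
      else (pvF g).insert y [1, pt])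
    = pvF (g.modify y [] (· ++ [pt])) := by
  rw [pvF_contains]
  by_cases h : g.contains y = true
  · -- key present: both sides overwrite in place
    simp only [h, if_pos]
    have hc : (pvF g).contains y = true := by rw [pvF_contains]; exact h
    obtain ⟨pts, hp⟩ : ∃ pts, g.get? y = some pts := by
      rcases hh : g.get? y with _ | pts
      · exfalso
        have := PySem.Dict.contains_eq_isSome_get? (d := g) (k := y)
        rw [hh] at this; simp [this] at h
      · exact ⟨pts, rfl⟩
    unfold PySem.Dict.modify
    rw [PySem.Dict.getD_eq_get?_getD, PySem.Dict.getD_eq_get?_getD, pvF_get?, hp]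
    simp only [Option.map_some, Option.getD_some]
    unfold PySem.Dict.insert
    rw [pvF_contains, if_pos h, if_pos h]
    apply PySem.Dict.ext
    simp only [pvF, List.map_map]
    apply List.map_congr_left
    intro p _
    by_cases hk : (p.1 == y) = true <;>
      simp [pvShape, Function.comp, hk, List.getD, add_comm]
  · -- key absent: both sides append
    simp only [h, if_neg, Bool.not_eq_true]
    have h' : g.contains y = false := by simpa using h
    unfold PySem.Dict.modify
    rw [PySem.Dict.getD_eq_get?_getD]
    have : g.get? y = none := by
      have := PySem.Dict.contains_eq_isSome_get? (d := g) (k := y)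
      rw [h'] at this
      cases hh : g.get? y with
      | none => rfl
      | some v => rw [hh] at this; simp at this
    rw [this]
    unfold PySem.Dict.insert
    rw [pvF_contains, if_neg (by simp [h']), if_neg (by simp [h'])]
    apply PySem.Dict.ext
    simp [pvF, pvShape]

-- loop invariant: A's fold from a shaped dict is the shape of B's fold
lemma pvInv (l : List (String × List Int)) (g : PySem.Dict Int (List Int)) :
    l.foldl (fun my_dict kv =>
      let birthyear := (PySem.List.pyGet? kv.2 3).getD 0
      let pts := (PySem.List.pyGet? kv.2 2).getD 0
      if my_dict.contains birthyear then
        my_dict.modify birthyear [] (fun data => [data.getD 0 0 + 1, data.getD 1 0 + pts])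
      else my_dict.insert birthyear [1, pts]) (pvF g)
    = pvF (l.foldl (fun g kv =>
        g.modify ((PySem.List.pyGet? kv.2 3).getD 0) [] (· ++ [(PySem.List.pyGet? kv.2 2).getD 0])) g) := by
  induction l generalizing g with
  | nil => rfl
  | cons kv l ih =>
    simp only [List.foldl_cons]
    rw [← ih]
    congr 1
    exact pvStep g ((PySem.List.pyGet? kv.2 3).getD 0) ((PySem.List.pyGet? kv.2 2).getD 0)

-- ===== VERDICT (by name: the statement is the Claim_ definition above) =====
theorem get_points_per_birthyear_spec : Claim_equal_get_points_per_birthyear := by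
  intro d _ _
  unfold Spec_get_points_per_birthyear get_points_per_birthyear get_points_per_birthyear_alt
  have h := pvInv d PySem.Dict.empty
  have he : pvF PySem.Dict.empty = PySem.Dict.empty := rfl
  rw [he] at h
  rw [h]
  rfl
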